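-- pv_equiv track=rewrite | github.com/smr547/mudpi | tools/generate_dhcp_dnsmasq.py | preferred_mac
-- ===== SOURCE A (Python) =====
-- from typing import Any, Dict, Iterable, List, Optional, Sequence, Tuple
--
-- def preferred_mac(macs: Dict[str, str]) -> Optional[Tuple[str, str]]:
--     for key in ("ethernet", "lan", "wifi", "wlan", "primary", "fallback"):
--         if key in macs:
--             return key, macs[key]
--     if macs:
--         key = next(iter(macs.keys()))
--         return key, macs[key]
--     return None
-- ===== SOURCE B (Python) =====
-- def preferred_mac(macs):
--     priority = {k: i for i, k in enumerate(("ethernet", "lan", "wifi", "wlan", "primary", "fallback"))}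
--     if not macs:
--         return None
--     key = min(macs, key=lambda k: priority.get(k, len(priority)))
--     return key, macs[key]
-- ===== Notes on version B (the rewrite author's own statement) =====
-- stated objective: idiomatic
-- what changed: Instead of probing the six fixed priority keys against the dict in order, B builds a key->rank index once and selects the best key with a single min(macs, key=rank) pass over the dict, relying on min's first-minimal tie-break to reproduce the insertion-order fallback.
import Mathlib
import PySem

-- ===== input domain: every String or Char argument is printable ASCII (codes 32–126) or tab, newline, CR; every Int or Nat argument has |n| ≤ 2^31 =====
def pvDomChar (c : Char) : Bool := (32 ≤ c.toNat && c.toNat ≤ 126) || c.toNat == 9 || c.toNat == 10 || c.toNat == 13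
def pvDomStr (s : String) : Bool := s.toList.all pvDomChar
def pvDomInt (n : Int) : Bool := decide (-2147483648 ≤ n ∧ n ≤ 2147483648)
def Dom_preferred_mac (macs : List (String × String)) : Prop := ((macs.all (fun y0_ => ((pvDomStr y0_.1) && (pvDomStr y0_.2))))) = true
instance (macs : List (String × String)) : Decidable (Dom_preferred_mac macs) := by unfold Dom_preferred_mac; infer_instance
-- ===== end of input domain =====

-- B replaces the six ordered membership probes by one min-by-rank scan over the dict's keys (idiomatic single pass; same cost).

-- ===== PORT A =====
-- the tuple ("ethernet", "lan", "wifi", "wlan", "primary", "fallback")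
def pmPriorityKeys : List String := ["ethernet", "lan", "wifi", "wlan", "primary", "fallback"]

-- the for-loop over the tuple; [] = loop exhausted, then the 'if macs: … return None' tail.
-- 'macs[key]' is Dict.get?; it is 'some' wherever Python reaches it, so '.getD' only totalizes.
def pmLoopA (macs : List (String × String)) : List String → Option (String × String)
  | [] =>
    match macs with
    | [] => none
    | (k, v) :: _ => some (k, ((PySem.Dict.mk macs).get? k).getD v)
  | p :: ps =>
    if (PySem.Dict.mk macs).contains p then
      some (p, ((PySem.Dict.mk macs).get? p).getD "")
    else pmLoopA macs ps

def preferred_mac (macs : List (String × String)) : Option (String × String) :=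
  pmLoopA macs pmPriorityKeys

-- ===== PORT B =====
-- priority = {k: i for i, k in enumerate((…))}
def pmbPriority : PySem.Dict String Int :=
  (PySem.List.enumerate ["ethernet", "lan", "wifi", "wlan", "primary", "fallback"]).foldl
    (fun d p => d.insert p.2 p.1) PySem.Dict.empty

-- lambda k: priority.get(k, len(priority))
def pmbRank (priority : PySem.Dict String Int) (k : String) : Int :=
  (priority.get? k).getD (priority.size : Int)

def preferred_mac_alt (macs : List (String × String)) : Option (String × String) :=
  let priority := pmbPriority
  if macs = [] then none
  else
    match PySem.List.min? (PySem.Dict.mk macs).keys (fun k => pmbRank priority k) with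
    | some best => some (best, ((PySem.Dict.mk macs).get? best).getD "")
    | none => none

-- ===== PRECONDITION & SPEC =====
def Spec_preferred_mac (macs : List (String × String)) (out : Option (String × String)) : Prop := out = preferred_mac_alt macs
instance (macs : List (String × String)) (out : Option (String × String)) : Decidable (Spec_preferred_mac macs out) := by unfold Spec_preferred_mac; infer_instance

-- ===== CLAIM (what is proved, stated in full; the proofs are below) =====
def Claim_equal_preferred_mac : Prop := ∀ (macs : List (String × String)), Dom_preferred_mac macs → Spec_preferred_mac macs (preferred_mac macs)

-- ===== LEMMAS AND PROOFS =====

-- closed-form rank of a key under pmbPriority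
def pvR (k : String) : Int :=
  if k = "ethernet" then 0 else if k = "lan" then 1 else if k = "wifi" then 2
  else if k = "wlan" then 3 else if k = "primary" then 4 else if k = "fallback" then 5 else 6

theorem pvPriority_items :
    pmbPriority = PySem.Dict.mk [("ethernet", 0), ("lan", 1), ("wifi", 2), ("wlan", 3), ("primary", 4), ("fallback", 5)] := by
  decide

theorem pvRank_eq (k : String) : pmbRank pmbPriority k = pvR k := by
  rw [pvPriority_items]
  simp only [pmbRank, PySem.Dict.get?, PySem.Dict.size, List.find?, Bool.beq_eq_decide_eq]
  unfold pvR
  by_cases h1 : k = "ethernet"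
  · subst h1; simp
  by_cases h2 : k = "lan"
  · subst h2; simp
  by_cases h3 : k = "wifi"
  · subst h3; simp
  by_cases h4 : k = "wlan"
  · subst h4; simp
  by_cases h5 : k = "primary"
  · subst h5; simp
  by_cases h6 : k = "fallback"
  · subst h6; simp
  have d1 : decide ("ethernet" = k) = false := decide_eq_false (fun h => h1 h.symm)
  have d2 : decide ("lan" = k) = false := decide_eq_false (fun h => h2 h.symm)
  have d3 : decide ("wifi" = k) = false := decide_eq_false (fun h => h3 h.symm)
  have d4 : decide ("wlan" = k) = false := decide_eq_false (fun h => h4 h.symm)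
  have d5 : decide ("primary" = k) = false := decide_eq_false (fun h => h5 h.symm)
  have d6 : decide ("fallback" = k) = false := decide_eq_false (fun h => h6 h.symm)
  simp only [d1, d2, d3, d4, d5, d6, if_neg h1, if_neg h2, if_neg h3, if_neg h4, if_neg h5, if_neg h6]
  rfl

theorem pvR_le6 (k : String) : pvR k ≤ 6 := by
  unfold pvR; split_ifs <;> norm_num

theorem pvR_lt1 (k : String) (h : pvR k < 1) : k = "ethernet" := by
  unfold pvR at h; split_ifs at h <;> first | tauto | omega

theorem pvR_lt2 (k : String) (h : pvR k < 2) : k = "ethernet" ∨ k = "lan" := by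
  unfold pvR at h; split_ifs at h <;> first | tauto | omega

theorem pvR_lt3 (k : String) (h : pvR k < 3) : k = "ethernet" ∨ k = "lan" ∨ k = "wifi" := by
  unfold pvR at h; split_ifs at h <;> first | tauto | omega

theorem pvR_lt4 (k : String) (h : pvR k < 4) :
    k = "ethernet" ∨ k = "lan" ∨ k = "wifi" ∨ k = "wlan" := by
  unfold pvR at h; split_ifs at h <;> first | tauto | omega

theorem pvR_lt5 (k : String) (h : pvR k < 5) :
    k = "ethernet" ∨ k = "lan" ∨ k = "wifi" ∨ k = "wlan" ∨ k = "primary" := by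
  unfold pvR at h; split_ifs at h <;> first | tauto | omega

theorem pvR_lt6 (k : String) (h : pvR k < 6) :
    k = "ethernet" ∨ k = "lan" ∨ k = "wifi" ∨ k = "wlan" ∨ k = "primary" ∨ k = "fallback" := by
  unfold pvR at h; split_ifs at h <;> first | tauto | omega

-- the running argmin over the tail, with B's key function
def pvM (b : String) (t : List String) : String :=
  t.foldl (fun m x => if pmbRank pmbPriority x < pmbRank pmbPriority m then x else m) b

theorem pvMin?_cons (b : String) (t : List String) :
    PySem.List.min? (b :: t) (fun k => pmbRank pmbPriority k) = some (pvM b t) := by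
  induction t generalizing b with
  | nil => simp [PySem.List.min?, pvM, List.foldl]
  | cons x t ih =>
    have hstep :
        PySem.List.min? (b :: x :: t) (fun k => pmbRank pmbPriority k) =
          PySem.List.min? ((if pmbRank pmbPriority x < pmbRank pmbPriority b then x else b) :: t)
            (fun k => pmbRank pmbPriority k) := by
      simp only [PySem.List.min?, List.foldl]
      rw [show (if pmbRank pmbPriority x < pmbRank pmbPriority b then some x else some b) =
            some (if pmbRank pmbPriority x < pmbRank pmbPriority b then x else b) from
          (apply_ite some _ _ _).symm]
    rw [hstep, ih]
    rfl

theorem pvM_mem (t : List String) (b : String) : pvM b t = b ∨ pvM b t ∈ t := by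
  induction t generalizing b with
  | nil => simp [pvM]
  | cons x t ih =>
    have hM : pvM b (x :: t) = pvM (if pmbRank pmbPriority x < pmbRank pmbPriority b then x else b) t := rfl
    rw [hM]
    rcases ih (if pmbRank pmbPriority x < pmbRank pmbPriority b then x else b) with h | h
    · rw [h]; split_ifs
      · right; exact List.mem_cons_self
      · left; rfl
    · right; exact List.mem_cons_of_mem _ h

theorem pvM_min (t : List String) (b : String) :
    ∀ x ∈ b :: t, pvR (pvM b t) ≤ pvR x := by
  induction t generalizing b with
  | nil => intro x hx; rw [List.mem_singleton] at hx; subst hx; simp [pvM]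
  | cons y t ih =>
    intro x hx
    have hM : pvM b (y :: t) = pvM (if pmbRank pmbPriority y < pmbRank pmbPriority b then y else b) t := rfl
    rw [hM]
    have hsel_b : pvR (if pmbRank pmbPriority y < pmbRank pmbPriority b then y else b) ≤ pvR b := by
      split_ifs with h
      · rw [pvRank_eq, pvRank_eq] at h; omega
      · exact le_refl _
    have hsel_y : pvR (if pmbRank pmbPriority y < pmbRank pmbPriority b then y else b) ≤ pvR y := by
      split_ifs with h
      · exact le_refl _
      · rw [pvRank_eq, pvRank_eq] at h; omega
    have hhead := ih (if pmbRank pmbPriority y < pmbRank pmbPriority b then y else b) _ List.mem_cons_self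
    rcases List.mem_cons.mp hx with rfl | hx'
    · exact le_trans hhead hsel_b
    · rcases List.mem_cons.mp hx' with rfl | hx''
      · exact le_trans hhead hsel_y
      · exact ih _ x (List.mem_cons_of_mem _ hx'')

theorem pvM_stay (t : List String) (b : String)
    (h : ∀ x ∈ t, ¬ pvR x < pvR b) : pvM b t = b := by
  induction t generalizing b with
  | nil => simp [pvM]
  | cons y t ih =>
    have hy : ¬ pmbRank pmbPriority y < pmbRank pmbPriority b := by
      rw [pvRank_eq, pvRank_eq]; exact h y List.mem_cons_self
    have hM : pvM b (y :: t) = pvM (if pmbRank pmbPriority y < pmbRank pmbPriority b then y else b) t := rfl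
    rw [hM, if_neg hy]
    exact ih b (fun x hx => h x (List.mem_cons_of_mem _ hx))

theorem pvContains_iff (l : List (String × String)) (p : String) :
    (PySem.Dict.mk l).contains p = true ↔ p ∈ l.map Prod.fst := by
  simp [PySem.Dict.contains, List.any_eq_true, List.mem_map]

-- ===== VERDICT (by name: the statement is the Claim_ definition above) =====
theorem preferred_mac_spec : Claim_equal_preferred_mac := by
  intro macs _
  unfold Spec_preferred_mac
  cases macs with
  | nil => decide
  | cons hd tl =>
    obtain ⟨k, v⟩ := hd
    have hkeys : (PySem.Dict.mk ((k, v) :: tl)).keys = k :: tl.map Prod.fst := by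
      simp [PySem.Dict.keys]
    unfold preferred_mac_alt
    rw [if_neg (by simp), hkeys, pvMin?_cons]
    set m := pvM k (tl.map Prod.fst) with hm
    change _ = some (m, ((PySem.Dict.mk ((k, v) :: tl)).get? m).getD "")
    have hmem : m ∈ ((k, v) :: tl).map Prod.fst := by
      rw [List.map_cons]
      rcases pvM_mem (tl.map Prod.fst) k with h | h
      · rw [show m = k from h]; exact List.mem_cons_self
      · exact List.mem_cons_of_mem _ h
    have hmin : ∀ x ∈ ((k, v) :: tl).map Prod.fst, pvR m ≤ pvR x := by
      intro x hx
      rw [List.map_cons] at hx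
      exact pvM_min (tl.map Prod.fst) k x hx
    simp only [preferred_mac, pmPriorityKeys, pmLoopA]
    by_cases c1 : (PySem.Dict.mk ((k, v) :: tl)).contains "ethernet"
    · have : m = "ethernet" := by
        have := hmin _ ((pvContains_iff _ _).mp c1)
        exact pvR_lt1 m (by simp [pvR] at this ⊢; omega)
      simp [c1, this]
    · rw [if_neg c1]
      have ne1 : m ≠ "ethernet" := fun h =>
        c1 ((pvContains_iff _ _).mpr (h ▸ hmem))
      by_cases c2 : (PySem.Dict.mk ((k, v) :: tl)).contains "lan"
      · have : m = "lan" := by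
          have hle := hmin _ ((pvContains_iff _ _).mp c2)
          rcases pvR_lt2 m (by simp [pvR] at hle ⊢; omega) with h | h
          · exact absurd h ne1
          · exact h
        simp [c2, this]
      · rw [if_neg c2]
        have ne2 : m ≠ "lan" := fun h => c2 ((pvContains_iff _ _).mpr (h ▸ hmem))
        by_cases c3 : (PySem.Dict.mk ((k, v) :: tl)).contains "wifi"
        · have : m = "wifi" := by
            have hle := hmin _ ((pvContains_iff _ _).mp c3)
            rcases pvR_lt3 m (by simp [pvR] at hle ⊢; omega) with h | h | h
            · exact absurd h ne1
            · exact absurd h ne2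
            · exact h
          simp [c3, this]
        · rw [if_neg c3]
          have ne3 : m ≠ "wifi" := fun h => c3 ((pvContains_iff _ _).mpr (h ▸ hmem))
          by_cases c4 : (PySem.Dict.mk ((k, v) :: tl)).contains "wlan"
          · have : m = "wlan" := by
              have hle := hmin _ ((pvContains_iff _ _).mp c4)
              rcases pvR_lt4 m (by simp [pvR] at hle ⊢; omega) with h | h | h | h
              · exact absurd h ne1
              · exact absurd h ne2
              · exact absurd h ne3
              · exact h
            simp [c4, this]
          · rw [if_neg c4]
            have ne4 : m ≠ "wlan" := fun h => c4 ((pvContains_iff _ _).mpr (h ▸ hmem))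
            by_cases c5 : (PySem.Dict.mk ((k, v) :: tl)).contains "primary"
            · have : m = "primary" := by
                have hle := hmin _ ((pvContains_iff _ _).mp c5)
                rcases pvR_lt5 m (by simp [pvR] at hle ⊢; omega) with h | h | h | h | h
                · exact absurd h ne1
                · exact absurd h ne2
                · exact absurd h ne3
                · exact absurd h ne4
                · exact h
              simp [c5, this]
            · rw [if_neg c5]
              have ne5 : m ≠ "primary" := fun h => c5 ((pvContains_iff _ _).mpr (h ▸ hmem))
              by_cases c6 : (PySem.Dict.mk ((k, v) :: tl)).contains "fallback"
              · have : m = "fallback" := by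
                  have hle := hmin _ ((pvContains_iff _ _).mp c6)
                  rcases pvR_lt6 m (by simp [pvR] at hle ⊢; omega) with h | h | h | h | h | h
                  · exact absurd h ne1
                  · exact absurd h ne2
                  · exact absurd h ne3
                  · exact absurd h ne4
                  · exact absurd h ne5
                  · exact h
                simp [c6, this]
              · rw [if_neg c6]
                have ne6 : m ≠ "fallback" := fun h => c6 ((pvContains_iff _ _).mpr (h ▸ hmem))
                -- no priority key present: every key has rank 6, so m is the head key
                have hstay : m = k := by
                  apply pvM_stay
                  intro x hx hlt
                  have hx' : x ∈ ((k, v) :: tl).map Prod.fst := by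
                    rw [List.map_cons]; exact List.mem_cons_of_mem _ hx
                  have h6 : pvR x < 6 := lt_of_lt_of_le hlt (pvR_le6 k)
                  rcases pvR_lt6 x h6 with h | h | h | h | h | h <;>
                    · subst h
                      first
                        | exact c1 ((pvContains_iff _ _).mpr hx')
                        | exact c2 ((pvContains_iff _ _).mpr hx')
                        | exact c3 ((pvContains_iff _ _).mpr hx')
                        | exact c4 ((pvContains_iff _ _).mpr hx')
                        | exact c5 ((pvContains_iff _ _).mpr hx')
                        | exact c6 ((pvContains_iff _ _).mpr hx')
                rw [hstay]
                simp [PySem.Dict.get?, List.find?]
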